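-- pv_equiv track=rewrite | github.com/shauangel/my-algorithm-playground | Basics/Graphs/GraphReverse.py | reverse_g
-- ===== SOURCE A (Python) =====
-- def reverse_g(graph):
--     g_r = {vertex: [] for vertex in graph}
--     for u in graph:
--         for v in graph[u]:
--             g_r[v].append(u)
--     for u in g_r:
--         g_r[u] = sorted(g_r[u])
--     return g_r
-- ===== SOURCE B (Python) =====
-- def reverse_g(graph):
--     edges = sorted((v, u) for u in graph for v in graph[u])
--     g_r = {vertex: [] for vertex in graph}
--     for v, u in edges:
--         g_r[v].append(u)
--     return g_r
-- ===== Notes on version B (the rewrite author's own statement) =====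
-- stated objective: alternative
-- what changed: Instead of appending into per-vertex buckets and then sorting each bucket, B flattens the graph into one globally sorted list of reversed edges and distributes it in a single pass, so the buckets come out already sorted with no per-list sort.
import Mathlib
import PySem

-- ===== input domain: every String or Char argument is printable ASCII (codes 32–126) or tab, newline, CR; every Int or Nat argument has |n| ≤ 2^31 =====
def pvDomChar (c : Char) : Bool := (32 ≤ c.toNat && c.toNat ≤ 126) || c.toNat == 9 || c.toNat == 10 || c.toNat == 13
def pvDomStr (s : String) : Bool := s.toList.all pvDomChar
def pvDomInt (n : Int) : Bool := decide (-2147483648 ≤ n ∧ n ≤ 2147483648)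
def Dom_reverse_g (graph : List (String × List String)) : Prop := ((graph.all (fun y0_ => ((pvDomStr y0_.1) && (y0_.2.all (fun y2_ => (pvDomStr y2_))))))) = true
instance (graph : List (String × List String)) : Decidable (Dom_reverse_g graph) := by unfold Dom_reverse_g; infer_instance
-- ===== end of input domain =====

-- B replaces per-bucket appends plus a per-key sort by one globally sorted flat edge list distributed
-- in a single pass (alternative decomposition, same cost). Equality of the RETURN value only.

-- ===== PORT A =====
-- Python's g_r[v].append(u) is ported as Dict.modify v [] (· ++ [u]); exact when v is a key of the
-- dict — guaranteed by Pre_reverse_g; on other inputs Python raises KeyError (outside Pre_).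
def reverse_g (graph : List (String × List String)) : List (String × List String) :=
  let g : PySem.Dict String (List String) := PySem.Dict.ofList graph
  let gr0 : PySem.Dict String (List String) :=
    g.keys.foldl (fun d vertex => d.insert vertex ([] : List String)) PySem.Dict.empty
  let gr1 : PySem.Dict String (List String) :=
    g.keys.foldl (fun d u =>
      (g.getD u []).foldl (fun d v => d.modify v [] (fun l => l ++ [u])) d) gr0
  let gr2 : PySem.Dict String (List String) :=
    gr1.keys.foldl (fun d u => d.insert u (PySem.List.sorted (d.getD u []) (fun x => x))) gr1
  gr2.items

-- ===== PORT B =====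
-- Same KeyError note: g_r[v].append(u) is Dict.modify v [] (· ++ [u]), exact under Pre_reverse_g.
def reverse_g_alt (graph : List (String × List String)) : List (String × List String) :=
  let g : PySem.Dict String (List String) := PySem.Dict.ofList graph
  let edges : List (String × String) :=
    PySem.List.sorted2 (g.items.flatMap (fun p => p.2.map (fun v => (v, p.1)))) Prod.fst Prod.snd
  let gr0 : PySem.Dict String (List String) :=
    g.keys.foldl (fun d vertex => d.insert vertex ([] : List String)) PySem.Dict.empty
  let gr : PySem.Dict String (List String) :=
    edges.foldl (fun d p => d.modify p.1 [] (fun l => l ++ [p.2])) gr0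
  gr.items

-- ===== PRECONDITION & SPEC =====
-- Pre_ excludes exactly the inputs on which Python A raises KeyError: some adjacency list contains
-- a vertex that is not a key of the dict (B raises KeyError there too).
def Pre_reverse_g (graph : List (String × List String)) : Prop :=
  ∀ p ∈ graph, ∀ v ∈ p.2, v ∈ graph.map Prod.fst
instance (graph : List (String × List String)) : Decidable (Pre_reverse_g graph) := by
  unfold Pre_reverse_g; infer_instance
def pvWitness_reverse_g : (List (String × List String)) := [("a", ["b", "a"]), ("b", ["a"])]
def Spec_reverse_g (graph : List (String × List String)) (out : List (String × List String)) : Prop := out = reverse_g_alt graph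
instance (graph : List (String × List String)) (out : List (String × List String)) : Decidable (Spec_reverse_g graph out) := by unfold Spec_reverse_g; infer_instance

-- ===== CLAIM (what is proved, stated in full; the proofs are below) =====
def Claim_equal_reverse_g : Prop := ∀ (graph : List (String × List String)), Dom_reverse_g graph → Pre_reverse_g graph → Spec_reverse_g graph (reverse_g graph)

-- ===== LEMMAS AND PROOFS =====

-- the comparison sorted2 uses on (target, source) pairs, and the lexicographic ≤ it sorts by
def lexLt (a b : String × String) : Bool :=
  decide (a.1 < b.1) || (!decide (b.1 < a.1) && decide (a.2 < b.2))
def LexLe (a b : String × String) : Prop := a.1 < b.1 ∨ (a.1 = b.1 ∧ a.2 ≤ b.2)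
-- the c-bucket read off an edge list: sources of the edges targeting c
def fm (c : String) (l : List (String × String)) : List String :=
  (l.filter (fun p => p.1 == c)).map Prod.snd
def insS (x : String) (l : List String) : List String :=
  PySem.List.insertBy (fun a b => decide (a < b)) x l

lemma insertBy_nil {α : Type} (b : α → α → Bool) (x : α) : PySem.List.insertBy b x [] = [x] := rfl
lemma insertBy_cons {α : Type} (b : α → α → Bool) (x y : α) (ys : List α) :
    PySem.List.insertBy b x (y :: ys) = if b x y then x :: y :: ys else y :: PySem.List.insertBy b x ys := rfl

lemma lexLt_eq_true_iff (x y : String × String) :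
    lexLt x y = true ↔ (x.1 < y.1 ∨ (x.1 = y.1 ∧ x.2 < y.2)) := by
  simp only [lexLt, Bool.or_eq_true, Bool.and_eq_true, Bool.not_eq_true', decide_eq_true_eq,
    decide_eq_false_iff_not]
  constructor
  · rintro (h | ⟨h1, h2⟩)
    · exact Or.inl h
    · rcases lt_trichotomy x.1 y.1 with a | a | a
      · exact Or.inl a
      · exact Or.inr ⟨a, h2⟩
      · exact absurd a h1
  · rintro (h | ⟨h1, h2⟩)
    · exact Or.inl h
    · exact Or.inr ⟨by rw [h1]; exact lt_irrefl _, h2⟩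

lemma lexLt_eq_false_le {x y : String × String} (hb : lexLt x y ≠ true) : LexLe y x := by
  have h : ¬ (x.1 < y.1 ∨ (x.1 = y.1 ∧ x.2 < y.2)) := fun h' => hb ((lexLt_eq_true_iff x y).mpr h')
  push_neg at h
  obtain ⟨h1, h2⟩ := h
  rcases lt_trichotomy y.1 x.1 with a | a | a
  · exact Or.inl a
  · exact Or.inr ⟨a, not_lt.mp (h2 a.symm)⟩
  · exact absurd a h1

lemma lexLe_trans {x y z : String × String} (h1 : LexLe x y) (h2 : LexLe y z) : LexLe x z := by
  rcases h1 with a | ⟨a1, a2⟩ <;> rcases h2 with b | ⟨b1, b2⟩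
  · exact Or.inl (lt_trans a b)
  · exact Or.inl (b1 ▸ a)
  · exact Or.inl (a1 ▸ b)
  · exact Or.inr ⟨a1.trans b1, le_trans a2 b2⟩

lemma pairwise_insertBy_lex (x : String × String) (ys : List (String × String))
    (h : ys.Pairwise LexLe) : (PySem.List.insertBy lexLt x ys).Pairwise LexLe := by
  induction ys with
  | nil => simp [insertBy_nil]
  | cons y ys ih =>
    rcases List.pairwise_cons.mp h with ⟨hy, hys⟩
    rw [insertBy_cons]
    by_cases hb : lexLt x y = true
    · rw [if_pos hb]
      refine List.pairwise_cons.mpr ⟨?_, h⟩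
      intro z hz
      have hxy : LexLe x y := by
        rcases (lexLt_eq_true_iff x y).mp hb with a | ⟨a1, a2⟩
        · exact Or.inl a
        · exact Or.inr ⟨a1, le_of_lt a2⟩
      rcases List.mem_cons.mp hz with rfl | hz'
      · exact hxy
      · exact lexLe_trans hxy (hy z hz')
    · rw [if_neg hb]
      refine List.pairwise_cons.mpr ⟨?_, ih hys⟩
      intro z hz
      rcases (PySem.List.insertBy_mem_iff _ _ _ _).mp hz with rfl | hz'
      · exact lexLt_eq_false_le hb
      · exact hy z hz'

lemma fm_cons_pos {c : String} {y : String × String} (ys : List (String × String))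
    (h : y.1 = c) : fm c (y :: ys) = y.2 :: fm c ys := by simp [fm, h]
lemma fm_cons_neg {c : String} {y : String × String} (ys : List (String × String))
    (h : y.1 ≠ c) : fm c (y :: ys) = fm c ys := by simp [fm, h]

lemma fm_insertBy (c : String) (x : String × String) (ys : List (String × String))
    (h : ys.Pairwise LexLe) :
    fm c (PySem.List.insertBy lexLt x ys)
      = if x.1 = c then insS x.2 (fm c ys) else fm c ys := by
  induction ys with
  | nil =>
    by_cases hx : x.1 = c
    · rw [insertBy_nil, if_pos hx, fm_cons_pos _ hx]; rfl
    · rw [insertBy_nil, if_neg hx, fm_cons_neg _ hx]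
  | cons y ys ih =>
    rcases List.pairwise_cons.mp h with ⟨hy, hys⟩
    rw [insertBy_cons]
    by_cases hb : lexLt x y = true
    · rw [if_pos hb]
      by_cases hx : x.1 = c
      · rw [if_pos hx, fm_cons_pos _ hx]
        rcases lt_trichotomy x.1 y.1 with h1 | h1 | h1
        · -- every key in y :: ys is > c, so the c-bucket of y :: ys is empty
          have hnil : fm c (y :: ys) = [] := by
            have hf : List.filter (fun p => p.1 == c) (y :: ys) = [] := by
              rw [List.filter_eq_nil_iff]
              intro z hz
              have hcz : c < z.1 := by
                rcases List.mem_cons.mp hz with rfl | hz'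
                · exact hx ▸ h1
                · rcases hy z hz' with a | ⟨a, _⟩
                  · exact lt_trans (hx ▸ h1) a
                  · exact a ▸ (hx ▸ h1)
              simp [ne_of_gt hcz]
            simp [fm, hf]
          rw [hnil]
          rfl
        · have hyc : y.1 = c := h1 ▸ hx
          have hx2 : x.2 < y.2 := by
            rcases (lexLt_eq_true_iff x y).mp hb with a | ⟨_, a⟩
            · exact absurd a (by rw [h1]; exact lt_irrefl _)
            · exact a
          rw [fm_cons_pos _ hyc]
          simp only [insS]
          rw [insertBy_cons]
          simp [hx2]
        · exfalso
          rcases (lexLt_eq_true_iff x y).mp hb with a | ⟨a, _⟩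
          · exact lt_asymm a h1
          · exact absurd a (ne_of_gt h1)
      · rw [if_neg hx, fm_cons_neg _ hx]
    · rw [if_neg hb]
      by_cases hyc : y.1 = c
      · rw [fm_cons_pos _ hyc, ih hys]
        by_cases hx : x.1 = c
        · rw [if_pos hx, if_pos hx, fm_cons_pos _ hyc]
          have hnlt : ¬ (x.2 < y.2) := fun hlt =>
            hb ((lexLt_eq_true_iff x y).mpr (Or.inr ⟨hx.trans hyc.symm, hlt⟩))
          simp only [insS]
          rw [insertBy_cons]
          simp [hnlt]
        · rw [if_neg hx, if_neg hx, fm_cons_pos _ hyc]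
      · rw [fm_cons_neg _ hyc, ih hys, fm_cons_neg _ hyc]

lemma fm_foldl_insertBy (c : String) (E : List (String × String)) :
    ∀ (acc : List (String × String)), acc.Pairwise LexLe →
    (E.foldl (fun a x => PySem.List.insertBy lexLt x a) acc).Pairwise LexLe ∧
    fm c (E.foldl (fun a x => PySem.List.insertBy lexLt x a) acc)
      = (fm c E).foldl (fun a v => insS v a) (fm c acc) := by
  induction E with
  | nil => intro acc h; exact ⟨h, by simp [fm]⟩
  | cons e E ih =>
    intro acc h
    have h1 := pairwise_insertBy_lex e acc h
    obtain ⟨p1, p2⟩ := ih (PySem.List.insertBy lexLt e acc) h1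
    refine ⟨p1, ?_⟩
    rw [List.foldl_cons, p2, fm_insertBy c e acc h]
    by_cases hx : e.1 = c
    · rw [if_pos hx, fm_cons_pos _ hx, List.foldl_cons]
    · rw [if_neg hx, fm_cons_neg _ hx]

lemma fm_sorted2 (c : String) (E : List (String × String)) :
    fm c (PySem.List.sorted2 E Prod.fst Prod.snd)
      = PySem.List.sorted (fm c E) (fun x => x) := by
  have hs2 : PySem.List.sorted2 E Prod.fst Prod.snd
      = E.foldl (fun a x => PySem.List.insertBy lexLt x a) [] := rfl
  have hs : PySem.List.sorted (fm c E) (fun x => x)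
      = (fm c E).foldl (fun a v => insS v a) [] :=
    PySem.List.sorted_eq_foldl_insertBy (fm c E) (fun x => x)
  have hmain := (fm_foldl_insertBy c E [] List.Pairwise.nil).2
  rw [hs2, hmain, hs]
  simp [fm]

lemma foldl_flatMap' {α β γ : Type} (f : γ → β → γ) (h : α → List β) (l : List α) (init : γ) :
    (l.flatMap h).foldl f init = l.foldl (fun acc a => (h a).foldl f acc) init := by
  induction l generalizing init with
  | nil => rfl
  | cons a l ih => simp only [List.flatMap_cons, List.foldl_append, List.foldl_cons, ih]

lemma set_update_self (s : PySem.Set String) (xs : List String) (hsub : ∀ x ∈ xs, x ∈ s) :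
    PySem.Set.update s xs = s := by
  rw [PySem.Set.update_eq_append_filter]
  have hf : List.filter (fun y => !PySem.Set.contains s y) (PySem.Set.ofList xs) = [] := by
    rw [List.filter_eq_nil_iff]
    intro y hy
    simpa using hsub y ((PySem.Set.mem_ofList xs y).mp hy)
  rw [hf, List.append_nil]

lemma getD_seed (c : String) (ks : List String) :
    ∀ d : PySem.Dict String (List String), d.getD c [] = [] →
    ((ks.foldl (fun d k => d.insert k ([] : List String)) d).getD c []) = [] := by
  induction ks with
  | nil => intro d h; exact h
  | cons k ks ih =>
    intro d h
    rw [List.foldl_cons]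
    apply ih
    rw [PySem.Dict.getD_insert]
    split_ifs with h1
    · rfl
    · exact h

lemma keys_seed (ks : List String) (hnd : ks.Nodup) :
    (ks.foldl (fun d k => d.insert k ([] : List String)) PySem.Dict.empty).keys = ks := by
  rw [PySem.Dict.keys_foldl_insert ks (fun _ _ => ([] : List String)) PySem.Dict.empty,
    PySem.Dict.keys_empty, PySem.Set.update_nil_left]
  exact PySem.Set.ofList_eq_self_of_nodup ks hnd

lemma sortpass_getD_not_mem (c : String) (ks : List String) (hc : c ∉ ks) :
    ∀ d : PySem.Dict String (List String),
    (ks.foldl (fun d u => d.insert u (PySem.List.sorted (d.getD u []) (fun x => x))) d).getD c []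
      = d.getD c [] := by
  induction ks with
  | nil => intro d; rfl
  | cons k ks ih =>
    intro d
    have hck : c ≠ k := by rintro rfl; exact hc (by simp)
    rw [List.foldl_cons, ih (fun h => hc (by simp [h])),
      PySem.Dict.getD_insert_of_ne _ _ _ hck]

lemma sortpass_getD (c : String) (ks : List String) (hnd : ks.Nodup) :
    ∀ d : PySem.Dict String (List String),
    (ks.foldl (fun d u => d.insert u (PySem.List.sorted (d.getD u []) (fun x => x))) d).getD c []
      = if c ∈ ks then PySem.List.sorted (d.getD c []) (fun x => x) else d.getD c [] := by
  induction ks with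
  | nil => intro d; simp
  | cons k ks ih =>
    intro d
    rcases List.nodup_cons.mp hnd with ⟨hk, hnd'⟩
    rw [List.foldl_cons]
    by_cases hc : c = k
    · subst hc
      rw [sortpass_getD_not_mem c ks hk, PySem.Dict.getD_insert_self, if_pos (by simp)]
    · rw [ih hnd', PySem.Dict.getD_insert_of_ne _ _ _ hc]
      simp [List.mem_cons, hc]

lemma ofList_eq_foldl (ps : List (String × List String)) :
    PySem.Dict.ofList ps = ps.foldl (fun d p => d.insert p.1 p.2) PySem.Dict.empty := rfl

lemma get?_foldl_insert_mem (ps : List (String × List String)) :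
    ∀ (d : PySem.Dict String (List String)) (u : String) (v : List String),
    ((ps.foldl (fun d p => d.insert p.1 p.2) d).get? u = some v) → (u, v) ∈ ps ∨ d.get? u = some v := by
  induction ps with
  | nil => intro d u v h; exact Or.inr h
  | cons p ps ih =>
    intro d u v h
    rw [List.foldl_cons] at h
    rcases ih _ u v h with h' | h'
    · exact Or.inl (List.mem_cons_of_mem _ h')
    · rw [PySem.Dict.get?_insert] at h'
      split_ifs at h' with h1
      · left
        have hv : p.2 = v := Option.some.inj h'
        rw [h1, ← hv]
        simp
      · exact Or.inr h'

lemma get?_ofList_mem (ps : List (String × List String)) (u : String) (v : List String)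
    (h : (PySem.Dict.ofList ps).get? u = some v) : (u, v) ∈ ps := by
  rw [ofList_eq_foldl] at h
  rcases get?_foldl_insert_mem ps PySem.Dict.empty u v h with h' | h'
  · exact h'
  · rw [PySem.Dict.get?_empty] at h'
    simp at h'

lemma mem_keys_ofList (ps : List (String × List String)) (u : String) :
    u ∈ (PySem.Dict.ofList ps).keys ↔ u ∈ ps.map Prod.fst := by
  rw [ofList_eq_foldl,
    PySem.Dict.keys_foldl_insert_key ps Prod.fst
      (fun (_ : PySem.Dict String (List String)) (p : String × List String) => p.2) PySem.Dict.empty,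
    PySem.Dict.keys_empty, PySem.Set.update_nil_left]
  exact PySem.Set.mem_ofList _ _

-- the flat reversed-edge list both programs effectively distribute
def edgesOf (graph : List (String × List String)) : List (String × String) :=
  (PySem.Dict.ofList graph).keys.flatMap
    (fun u => ((PySem.Dict.ofList graph).getD u []).map (fun v => (v, u)))

lemma edges_fst_mem_keys (graph : List (String × List String)) (hpre : Pre_reverse_g graph) :
    ∀ q ∈ edgesOf graph, q.1 ∈ (PySem.Dict.ofList graph).keys := by
  intro q hq
  rcases List.mem_flatMap.mp hq with ⟨u, hu, hq'⟩
  rcases List.mem_map.mp hq' with ⟨v, hv, rfl⟩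
  have hne : (PySem.Dict.ofList graph).getD u [] ≠ [] := fun h => by rw [h] at hv; simp at hv
  have hsome : ∃ adj, (PySem.Dict.ofList graph).get? u = some adj ∧
      adj = (PySem.Dict.ofList graph).getD u [] := by
    rcases hget : (PySem.Dict.ofList graph).get? u with _ | adj
    · exact absurd (PySem.Dict.getD_of_get?_eq_none _ _ hget) hne
    · exact ⟨adj, rfl, (PySem.Dict.getD_of_get?_eq_some _ _ hget).symm⟩
  rcases hsome with ⟨adj, hget, hadj⟩
  have hmem : (u, adj) ∈ graph := get?_ofList_mem graph u adj hget
  have hvadj : v ∈ adj := hadj ▸ hv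
  rw [mem_keys_ofList]
  exact hpre (u, adj) hmem v hvadj

lemma reverse_g_eq (graph : List (String × List String)) :
    reverse_g graph =
      (((edgesOf graph).foldl (fun d p => d.modify p.1 [] (fun l => l ++ [p.2]))
          ((PySem.Dict.ofList graph).keys.foldl
            (fun d vertex => d.insert vertex ([] : List String)) PySem.Dict.empty)).keys.foldl
        (fun d u => d.insert u (PySem.List.sorted (d.getD u []) (fun x => x)))
        ((edgesOf graph).foldl (fun d p => d.modify p.1 [] (fun l => l ++ [p.2]))
          ((PySem.Dict.ofList graph).keys.foldl
            (fun d vertex => d.insert vertex ([] : List String)) PySem.Dict.empty))).items := by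
  unfold reverse_g edgesOf
  rw [foldl_flatMap']
  simp only [List.foldl_map]

lemma reverse_g_alt_eq (graph : List (String × List String)) :
    reverse_g_alt graph =
      ((PySem.List.sorted2 (edgesOf graph) Prod.fst Prod.snd).foldl
        (fun d p => d.modify p.1 [] (fun l => l ++ [p.2]))
        ((PySem.Dict.ofList graph).keys.foldl
          (fun d vertex => d.insert vertex ([] : List String)) PySem.Dict.empty)).items := by
  have h0 : reverse_g_alt graph =
      ((PySem.List.sorted2
          ((PySem.Dict.ofList graph).items.flatMap (fun p => p.2.map (fun v => (v, p.1))))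
          Prod.fst Prod.snd).foldl
        (fun d p => d.modify p.1 [] (fun l => l ++ [p.2]))
        ((PySem.Dict.ofList graph).keys.foldl
          (fun d vertex => d.insert vertex ([] : List String)) PySem.Dict.empty)).items := rfl
  rw [h0, PySem.Dict.items_eq_map_keys _ (PySem.Dict.nodup_keys_ofList graph) ([] : List String),
    List.flatMap_map]
  rfl

-- ===== VERDICT (by name: the statement is the Claim_ definition above) =====
theorem reverse_g_spec : Claim_equal_reverse_g := by
  intro graph hdom hpre
  unfold Spec_reverse_g
  rw [reverse_g_eq, reverse_g_alt_eq]
  have hndk : (PySem.Dict.ofList graph).keys.Nodup := PySem.Dict.nodup_keys_ofList graph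
  set ks := (PySem.Dict.ofList graph).keys with hks
  set seed := ks.foldl (fun d vertex => d.insert vertex ([] : List String)) PySem.Dict.empty with hseed
  have hseedkeys : seed.keys = ks := keys_seed ks hndk
  have hseedgetD : ∀ c, seed.getD c [] = [] := fun c =>
    getD_seed c ks PySem.Dict.empty (by rw [PySem.Dict.getD_empty])
  have hupdA : PySem.Set.update ks ((edgesOf graph).map Prod.fst) = ks :=
    set_update_self ks _ (by
      intro x hx
      rcases List.mem_map.mp hx with ⟨q, hq, rfl⟩
      exact edges_fst_mem_keys graph hpre q hq)
  have hupdB : PySem.Set.update ks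
      ((PySem.List.sorted2 (edgesOf graph) Prod.fst Prod.snd).map Prod.fst) = ks :=
    set_update_self ks _ (by
      intro x hx
      rcases List.mem_map.mp hx with ⟨q, hq, rfl⟩
      exact edges_fst_mem_keys graph hpre q
        ((PySem.List.sorted2_perm (edgesOf graph) Prod.fst Prod.snd false).mem_iff.mp hq))
  set filled := (edgesOf graph).foldl (fun d p => d.modify p.1 [] (fun l => l ++ [p.2])) seed with hfilled
  set filledB := (PySem.List.sorted2 (edgesOf graph) Prod.fst Prod.snd).foldl
      (fun d p => d.modify p.1 [] (fun l => l ++ [p.2])) seed with hfilledB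
  have hkeysA : filled.keys = ks := by
    rw [hfilled, PySem.Dict.keys_foldl_modify_key (edgesOf graph) Prod.fst ([] : List String)
      (fun _ p => (fun l => l ++ [p.2])) seed, hseedkeys, hupdA]
  have hkeysB : filledB.keys = ks := by
    rw [hfilledB, PySem.Dict.keys_foldl_modify_key _ Prod.fst ([] : List String)
      (fun _ p => (fun l => l ++ [p.2])) seed, hseedkeys, hupdB]
  set final := filled.keys.foldl
      (fun d u => d.insert u (PySem.List.sorted (d.getD u []) (fun x => x))) filled with hfinal
  have hkeysF : final.keys = ks := by
    rw [hfinal, PySem.Dict.keys_foldl_insert filled.keys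
      (fun d u => PySem.List.sorted (d.getD u []) (fun x => x)) filled, hkeysA,
      set_update_self ks ks (fun x hx => hx)]
  have hndF : final.keys.Nodup := by rw [hkeysF]; exact hndk
  have hndB : filledB.keys.Nodup := by rw [hkeysB]; exact hndk
  have hvalA : ∀ c ∈ ks, final.getD c []
      = PySem.List.sorted (fm c (edgesOf graph)) (fun x => x) := by
    intro c hc
    have h1 : filled.getD c [] = fm c (edgesOf graph) := by
      rw [hfilled, PySem.Dict.getD_foldl_modify_append, hseedgetD c, List.nil_append]
      rfl
    rw [hfinal, sortpass_getD c filled.keys (by rw [hkeysA]; exact hndk) filled,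
      if_pos (by rw [hkeysA]; exact hc), h1]
  have hvalB : ∀ c, filledB.getD c []
      = PySem.List.sorted (fm c (edgesOf graph)) (fun x => x) := by
    intro c
    have h1 : fm c (PySem.List.sorted2 (edgesOf graph) Prod.fst Prod.snd)
        = PySem.List.sorted (fm c (edgesOf graph)) (fun x => x) := fm_sorted2 c (edgesOf graph)
    rw [hfilledB, PySem.Dict.getD_foldl_modify_append, hseedgetD c, List.nil_append, ← h1]
    rfl
  rw [PySem.Dict.items_eq_map_keys final hndF ([] : List String),
    PySem.Dict.items_eq_map_keys filledB hndB ([] : List String), hkeysF, hkeysB]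
  apply List.map_congr_left
  intro c hc
  rw [hvalA c hc, hvalB c]
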